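-- pv_equiv track=rewrite | github.com/tomasnyberg/cp_notebook | codeforces/1400/1499C.py | solve
-- ===== SOURCE A (Python) =====
-- def solve(n, costs):
--     oddcnt = 0
--     evencnt = 0
--     oddsum = 0
--     evensum = 0
--     small_even = 10**20
--     small_odd = 10**20
--     result = 10**30
--     for i in range(n):
--         if i % 2 == 0:
--             small_even = min(small_even, costs[i])
--         else:
--             small_odd = min(small_odd, costs[i])
--         result = min(result, oddsum + (n-oddcnt)*small_odd + evensum + (n-evencnt)*small_even)
--         if i % 2 == 0:
--             evencnt += 1
--             evensum += costs[i]
--         else: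
--             oddcnt += 1
--             oddsum += costs[i]
--     return result
-- ===== SOURCE B (Python) =====
-- def split(xs):
--     # deinterleave: elements at even positions, elements at odd positions
--     evens, odds = [], []
--     at_even = True
--     for x in xs:
--         if at_even:
--             evens.append(x)
--         else:
--             odds.append(x)
--         at_even = not at_even
--     return evens, odds
--
--
-- def scan(f, init, xs):
--     # prefix table: scan(f, s, [x0, x1, ...]) = [s, f(s,x0), f(f(s,x0),x1), ...]
--     out = [init]
--     cur = init
--     for x in xs:
--         cur = f(cur, x)
--         out.append(cur)
--     return out
--
--
-- def solve(n, costs):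
--     # Deinterleave the relevant prefix, build four independent prefix tables
--     # (running minima and running sums per parity class), then combine them
--     # per index with pure index arithmetic and take the minimum.
--     evens, odds = split(costs[:n])
--     mine = scan(min, 10**20, evens)
--     mino = scan(min, 10**20, odds)
--     sume = scan(lambda a, b: a + b, 0, evens)
--     sumo = scan(lambda a, b: a + b, 0, odds)
--     best = 10**30
--     for i in range(n):
--         no = (i + 1) // 2          # odd indices <= i  ==  even indices < i
--         ne = i // 2                # odd indices < i
--         cand = sumo[ne] + (n - ne) * mino[no] + sume[no] + (n - no) * mine[ne + 1]
--         best = min(best, cand)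
--     return best
-- ===== Notes on version B (the rewrite author's own statement) =====
-- stated objective: alternative
-- what changed: Replaces A's single fused loop (seven interleaved running variables updated per index, with a staggered update order) by a staged-pass algorithm: deinterleave the prefix into even- and odd-position elements, build four independent prefix tables (running minima and running sums per parity class), then combine the tables per index with pure index arithmetic (i//2, (i+1)//2) and take the minimum.
import Mathlib
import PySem

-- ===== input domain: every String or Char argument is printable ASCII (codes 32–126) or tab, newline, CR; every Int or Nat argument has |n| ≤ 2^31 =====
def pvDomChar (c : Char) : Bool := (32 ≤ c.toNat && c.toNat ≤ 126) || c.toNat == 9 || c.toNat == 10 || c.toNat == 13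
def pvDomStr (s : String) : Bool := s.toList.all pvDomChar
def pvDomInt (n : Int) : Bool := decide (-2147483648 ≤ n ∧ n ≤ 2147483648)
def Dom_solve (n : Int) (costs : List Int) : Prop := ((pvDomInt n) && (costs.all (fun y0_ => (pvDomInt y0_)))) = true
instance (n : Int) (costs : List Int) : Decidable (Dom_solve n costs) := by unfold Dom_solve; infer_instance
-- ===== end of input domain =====

-- B replaces A's single fused stateful loop by a staged-pass algorithm:
-- deinterleave the prefix into the even- and odd-position elements, build four
-- independent prefix tables (running minima, running sums), then combine them
-- per index by pure index arithmetic; same O(n) cost (objective: alternative).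

-- ===== PORT A =====
-- state = (oddcnt, evencnt, oddsum, evensum, small_even, small_odd, result)
def stepA (n : Int) (costs : List Int)
    (st : Int × Int × Int × Int × Int × Int × Int) (i : Int) :
    Int × Int × Int × Int × Int × Int × Int :=
  let oddcnt := st.1; let evencnt := st.2.1; let oddsum := st.2.2.1
  let evensum := st.2.2.2.1; let se := st.2.2.2.2.1; let so := st.2.2.2.2.2.1
  let result := st.2.2.2.2.2.2
  let c := PySem.List.pyGetD costs i 0      -- costs[i]; in range on Pre_solve
  let se := if PySem.Int.mod i 2 = 0 then min se c else se
  let so := if PySem.Int.mod i 2 = 0 then so else min so c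
  let result := min result (oddsum + (n - oddcnt) * so + evensum + (n - evencnt) * se)
  if PySem.Int.mod i 2 = 0 then
    (oddcnt, evencnt + 1, oddsum, evensum + c, se, so, result)
  else
    (oddcnt + 1, evencnt, oddsum + c, evensum, se, so, result)

def solve (n : Int) (costs : List Int) : Int :=
  ((PySem.List.pyRange 0 n 1).foldl (stepA n costs)
    (0, 0, 0, 0, 10^20, 10^20, 10^30)).2.2.2.2.2.2

-- ===== PORT B =====
-- split: deinterleave; loop state = (evens, odds, at_even)
def splitStep (st : List Int × List Int × Bool) (x : Int) : List Int × List Int × Bool :=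
  if st.2.2 then (st.1 ++ [x], st.2.1, !st.2.2) else (st.1, st.2.1 ++ [x], !st.2.2)

def pySplit (xs : List Int) : List Int × List Int :=
  let st := xs.foldl splitStep ([], [], true)
  (st.1, st.2.1)

-- scan: prefix table; loop state = (out, cur)
def pyScan (f : Int → Int → Int) (init : Int) (xs : List Int) : List Int :=
  (xs.foldl (fun st x => (st.1 ++ [f st.2 x], f st.2 x)) ([init], init)).1

-- body of B's final combining loop
def stepB (n : Int) (sumo mino sume mine : List Int) (best i : Int) : Int :=
  let no := PySem.Int.floordiv (i + 1) 2
  let ne := PySem.Int.floordiv i 2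
  -- table lookups are in range on Pre_solve
  min best (PySem.List.pyGetD sumo ne 0 + (n - ne) * PySem.List.pyGetD mino no 0
    + PySem.List.pyGetD sume no 0 + (n - no) * PySem.List.pyGetD mine (ne + 1) 0)

def solve_alt (n : Int) (costs : List Int) : Int :=
  let p := pySplit (PySem.List.slice costs none (some n))   -- costs[:n]
  let mine := pyScan min (10^20) p.1
  let mino := pyScan min (10^20) p.2
  let sume := pyScan (· + ·) 0 p.1
  let sumo := pyScan (· + ·) 0 p.2
  (PySem.List.pyRange 0 n 1).foldl (stepB n sumo mino sume mine) (10^30)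

-- ===== PRECONDITION & SPEC =====
-- A indexes costs[i] for every i in range(n): it raises IndexError unless n ≤ len(costs).
def Pre_solve (n : Int) (costs : List Int) : Prop := n ≤ (costs.length : Int)
instance (n : Int) (costs : List Int) : Decidable (Pre_solve n costs) := by
  unfold Pre_solve; infer_instance

def pvWitness_solve : Int × List Int := (4, [3, -1, 4, -5])

def Spec_solve (n : Int) (costs : List Int) (out : Int) : Prop := out = solve_alt n costs
instance (n : Int) (costs : List Int) (out : Int) : Decidable (Spec_solve n costs out) := by
  unfold Spec_solve; infer_instance

-- ===== CLAIM (what is proved, stated in full; the proofs are below) =====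
def Claim_equal_solve : Prop := ∀ (n : Int) (costs : List Int), Dom_solve n costs → Pre_solve n costs → Spec_solve n costs (solve n costs)

-- ===== LEMMAS AND PROOFS =====

-- Recursive characterization of pySplit.
def splitRec : List Int → List Int × List Int
  | [] => ([], [])
  | x :: xs => ((splitRec xs).2.cons x, (splitRec xs).1)

lemma split_fold (xs : List Int) : ∀ (e o : List Int) (ae : Bool),
    xs.foldl splitStep (e, o, ae)
      = (e ++ (if ae then (splitRec xs).1 else (splitRec xs).2),
         o ++ (if ae then (splitRec xs).2 else (splitRec xs).1),
         if xs.length % 2 = 0 then ae else !ae) := by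
  induction xs with
  | nil => intro e o ae; simp [splitRec]
  | cons x xs ih =>
    intro e o ae
    cases ae <;>
      simp [splitStep, splitRec, ih, Nat.succ_mod_two_eq_zero_iff] <;>
      rcases Nat.mod_two_eq_zero_or_one xs.length with h | h <;> simp [h]

lemma pySplit_eq (xs : List Int) : pySplit xs = splitRec xs := by
  simp [pySplit, split_fold]

lemma split_getD (l : List Int) :
    (∀ j : Nat, (splitRec l).1.getD j 0 = l.getD (2*j) 0) ∧
    (∀ j : Nat, (splitRec l).2.getD j 0 = l.getD (2*j+1) 0) := by
  induction l with
  | nil => simp [splitRec]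
  | cons x l ih =>
    constructor
    · intro j
      cases j with
      | zero => simp [splitRec]
      | succ j => simpa [splitRec, Nat.mul_succ] using (ih.2 j)
    · intro j
      simpa [splitRec] using (ih.1 j)

lemma split_len (l : List Int) :
    (splitRec l).1.length = (l.length + 1) / 2 ∧ (splitRec l).2.length = l.length / 2 := by
  induction l with
  | nil => simp [splitRec]
  | cons x l ih => simp [splitRec, ih.1, ih.2]; omega

-- pyScan is List.scanl.
lemma scanl_head_tail (f : Int → Int → Int) (b : Int) (l : List Int) :
    b :: (List.scanl f b l).tail = List.scanl f b l := by
  cases l <;> simp [List.scanl_cons]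

lemma pyScan_fold (f : Int → Int → Int) (xs : List Int) : ∀ (out : List Int) (cur : Int),
    (xs.foldl (fun st x => (st.1 ++ [f st.2 x], f st.2 x)) (out, cur)).1
      = out ++ (List.scanl f cur xs).tail := by
  induction xs with
  | nil => intro out cur; simp
  | cons x xs ih =>
    intro out cur
    simp [List.foldl_cons, ih, List.scanl_cons, scanl_head_tail]

lemma pyScan_eq (f : Int → Int → Int) (init : Int) (xs : List Int) :
    pyScan f init xs = List.scanl f init xs := by
  cases xs <;> simp [pyScan, pyScan_fold, List.scanl_cons, scanl_head_tail]

lemma scanl_getD (f : Int → Int → Int) (xs : List Int) : ∀ (b : Int) (j : Nat), j ≤ xs.length →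
    (List.scanl f b xs).getD j 0 = (xs.take j).foldl f b := by
  induction xs with
  | nil => intro b j hj; simp at hj; subst hj; simp
  | cons x xs ih =>
    intro b j hj
    cases j with
    | zero => simp [List.scanl_cons]
    | succ j => simpa [List.scanl_cons] using ih (f b x) j (by simpa using hj)

-- take one more element (getD form, in range)
lemma take_succ_getD (l : List Int) (j : Nat) (h : j < l.length) :
    l.take (j+1) = l.take j ++ [l.getD j 0] := by
  rw [List.getD_eq_getElem l 0 h, List.take_add_one, List.getElem?_eq_getElem h]
  rfl

-- getD of a take, within the taken prefix
lemma getD_take_lt (l : List Int) (t j : Nat) (h : j < t) (h2 : j < l.length) :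
    (l.take t).getD j 0 = l.getD j 0 := by
  rw [List.getD_eq_getElem _ 0 (by simp; omega), List.getD_eq_getElem _ 0 h2,
    List.getElem_take]

-- The linking invariant: A's full state after m iterations, in terms of the
-- deinterleaved prefix tables B builds.
lemma main_inv (n : Int) (costs : List Int) (hn : 0 ≤ n) (hlen : n ≤ (costs.length : Int))
    (E O : List Int) (hEO : splitRec (costs.take n.toNat) = (E, O))
    (m : Nat) (hm : m ≤ n.toNat) :
    (PySem.List.pyRange 0 (m : Int) 1).foldl (stepA n costs) (0, 0, 0, 0, 10^20, 10^20, 10^30)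
      = (((m/2 : Nat) : Int), (((m+1)/2 : Nat) : Int),
         (O.take (m/2)).foldl (· + ·) 0, (E.take ((m+1)/2)).foldl (· + ·) 0,
         (E.take ((m+1)/2)).foldl min (10^20), (O.take (m/2)).foldl min (10^20),
         (PySem.List.pyRange 0 (m : Int) 1).foldl
           (stepB n (List.scanl (· + ·) 0 O) (List.scanl min (10^20) O)
                    (List.scanl (· + ·) 0 E) (List.scanl min (10^20) E)) (10^30)) := by
  have hE := congrArg Prod.fst hEO
  have hO := congrArg Prod.snd hEO
  simp only at hE hO
  have hlenN : n.toNat ≤ costs.length := by omega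
  have hlL : (costs.take n.toNat).length = n.toNat := by simp; omega
  have hlE : E.length = (n.toNat + 1) / 2 := by
    rw [← hE, (split_len _).1, hlL]
  have hlO : O.length = n.toNat / 2 := by
    rw [← hO, (split_len _).2, hlL]
  have hgetE : ∀ j, 2*j < n.toNat → E.getD j 0 = costs.getD (2*j) 0 := by
    intro j hj
    rw [← hE, (split_getD _).1 j, getD_take_lt _ _ _ (by omega) (by omega)]
  have hgetO : ∀ j, 2*j+1 < n.toNat → O.getD j 0 = costs.getD (2*j+1) 0 := by
    intro j hj
    rw [← hO, (split_getD _).2 j, getD_take_lt _ _ _ (by omega) (by omega)]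
  induction m with
  | zero => simp
  | succ m ih =>
    have hm' : m ≤ n.toNat := by omega
    have hsplit : (PySem.List.pyRange 0 ((m+1 : Nat) : Int) 1)
        = PySem.List.pyRange 0 (m : Int) 1 ++ [(m : Int)] := by
      have h1 : ((m+1 : Nat) : Int) = (m : Int) + 1 := by push_cast; ring
      rw [h1, PySem.List.pyRange_one_succ_right (by positivity)]
    rw [hsplit, List.foldl_append, List.foldl_append, ih hm']
    rcases Nat.even_or_odd m with ⟨k, hk⟩ | ⟨k, hk⟩
    · -- m = k + k even: index m goes to the even class
      subst hk
      have e1 : (k + k) / 2 = k := by omega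
      have e2 : (k + k + 1) / 2 = k := by omega
      have e3 : (k + k + 1 + 1) / 2 = k + 1 := by omega
      have hparity : PySem.Int.mod ((k + k : Nat) : Int) 2 = 0 := by
        rw [PySem.Int.mod_eq_zero_iff_dvd]; omega
      have hkE : k < E.length := by omega
      have hidx1 : PySem.Int.floordiv ((k + k : Nat) : Int) 2 = ((k : Nat) : Int) := by
        rw [show ((2:Int)) = ((2:Nat):Int) from rfl, PySem.Int.floordiv_natCast]; simp [e1]
      have hidx2 : PySem.Int.floordiv (((k + k : Nat) : Int) + 1) 2 = ((k : Nat) : Int) := by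
        rw [show ((k + k : Nat) : Int) + 1 = ((k + k + 1 : Nat) : Int) by push_cast; ring,
          show ((2:Int)) = ((2:Nat):Int) from rfl, PySem.Int.floordiv_natCast]
        simp [e2]
      have hc : PySem.List.pyGetD costs ((k + k : Nat) : Int) 0 = E.getD k 0 := by
        rw [PySem.List.pyGetD_natCast, hgetE k (by omega)]; congr 1; omega
      have hv1 : PySem.List.pyGetD (List.scanl (· + ·) 0 O) ((k : Nat) : Int) 0
          = (O.take k).foldl (· + ·) 0 := by
        rw [PySem.List.pyGetD_natCast, scanl_getD _ _ _ _ (by omega)]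
      have hv2 : PySem.List.pyGetD (List.scanl min (10^20) O) ((k : Nat) : Int) 0
          = (O.take k).foldl min (10^20) := by
        rw [PySem.List.pyGetD_natCast, scanl_getD _ _ _ _ (by omega)]
      have hv3 : PySem.List.pyGetD (List.scanl (· + ·) 0 E) ((k : Nat) : Int) 0
          = (E.take k).foldl (· + ·) 0 := by
        rw [PySem.List.pyGetD_natCast, scanl_getD _ _ _ _ (by omega)]
      have hv4 : PySem.List.pyGetD (List.scanl min (10^20) E) (((k : Nat) : Int) + 1) 0
          = (E.take (k + 1)).foldl min (10^20) := by
        rw [show ((k : Nat) : Int) + 1 = ((k + 1 : Nat) : Int) by push_cast; ring,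
          PySem.List.pyGetD_natCast, scanl_getD _ _ _ _ (by omega)]
      have hmin : (E.take (k + 1)).foldl min (10^20)
          = min ((E.take k).foldl min (10^20)) (E.getD k 0) := by
        rw [take_succ_getD E k hkE, List.foldl_append]; rfl
      have hsum : (E.take (k + 1)).foldl (· + ·) 0
          = (E.take k).foldl (· + ·) 0 + E.getD k 0 := by
        rw [take_succ_getD E k hkE, List.foldl_append]; rfl
      simp only [List.foldl_cons, List.foldl_nil, stepA, stepB, e1, e2, e3, hparity,
        hidx1, hidx2, hc, hv1, hv2, hv3, hv4, hmin, hsum]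
      push_cast
      simp
    · -- m = 2k + 1 odd: index m goes to the odd class
      subst hk
      have e1 : (2 * k + 1) / 2 = k := by omega
      have e2 : (2 * k + 1 + 1) / 2 = k + 1 := by omega
      have e3 : (2 * k + 1 + 1 + 1) / 2 = k + 1 := by omega
      have hparity : ¬ PySem.Int.mod ((2 * k + 1 : Nat) : Int) 2 = 0 := by
        rw [PySem.Int.mod_eq_zero_iff_dvd]; omega
      have hkO : k < O.length := by omega
      have hidx1 : PySem.Int.floordiv ((2 * k + 1 : Nat) : Int) 2 = ((k : Nat) : Int) := by
        rw [show ((2:Int)) = ((2:Nat):Int) from rfl, PySem.Int.floordiv_natCast]; simp [e1]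
      have hidx2 : PySem.Int.floordiv (((2 * k + 1 : Nat) : Int) + 1) 2
          = ((k + 1 : Nat) : Int) := by
        rw [show ((2 * k + 1 : Nat) : Int) + 1 = ((2 * k + 1 + 1 : Nat) : Int) by push_cast; ring,
          show ((2:Int)) = ((2:Nat):Int) from rfl, PySem.Int.floordiv_natCast]
        simp [e2]
      have hc : PySem.List.pyGetD costs ((2 * k + 1 : Nat) : Int) 0 = O.getD k 0 := by
        rw [PySem.List.pyGetD_natCast, hgetO k (by omega)]
      have hv1 : PySem.List.pyGetD (List.scanl (· + ·) 0 O) ((k : Nat) : Int) 0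
          = (O.take k).foldl (· + ·) 0 := by
        rw [PySem.List.pyGetD_natCast, scanl_getD _ _ _ _ (by omega)]
      have hv2 : PySem.List.pyGetD (List.scanl min (10^20) O) ((k + 1 : Nat) : Int) 0
          = (O.take (k + 1)).foldl min (10^20) := by
        rw [PySem.List.pyGetD_natCast, scanl_getD _ _ _ _ (by omega)]
      have hv3 : PySem.List.pyGetD (List.scanl (· + ·) 0 E) ((k + 1 : Nat) : Int) 0
          = (E.take (k + 1)).foldl (· + ·) 0 := by
        rw [PySem.List.pyGetD_natCast, scanl_getD _ _ _ _ (by omega)]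
      have hv4 : PySem.List.pyGetD (List.scanl min (10^20) E) (((k : Nat) : Int) + 1) 0
          = (E.take (k + 1)).foldl min (10^20) := by
        rw [show ((k : Nat) : Int) + 1 = ((k + 1 : Nat) : Int) by push_cast; ring,
          PySem.List.pyGetD_natCast, scanl_getD _ _ _ _ (by omega)]
      have hmin : (O.take (k + 1)).foldl min (10^20)
          = min ((O.take k).foldl min (10^20)) (O.getD k 0) := by
        rw [take_succ_getD O k hkO, List.foldl_append]; rfl
      have hsum : (O.take (k + 1)).foldl (· + ·) 0
          = (O.take k).foldl (· + ·) 0 + O.getD k 0 := by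
        rw [take_succ_getD O k hkO, List.foldl_append]; rfl
      simp only [List.foldl_cons, List.foldl_nil, stepA, stepB, e1, e2, e3, hparity,
        hidx1, hidx2, hc, hv1, hv2, hv3, hv4, hmin, hsum]
      push_cast
      simp

-- ===== VERDICT (by name: the statement is the Claim_ definition above) =====
theorem solve_spec : Claim_equal_solve := by
  intro n costs _ hpre
  unfold Spec_solve solve solve_alt
  rcases le_or_gt n 0 with hn | hn
  · rw [PySem.List.pyRange_one_eq_nil hn]; simp
  · have h0 : (0:Int) ≤ n := le_of_lt hn
    obtain ⟨E, O, hEO⟩ : ∃ E O, splitRec (costs.take n.toNat) = (E, O) := ⟨_, _, rfl⟩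
    have hmain := main_inv n costs h0 hpre E O hEO n.toNat le_rfl
    rw [Int.toNat_of_nonneg h0] at hmain
    rw [hmain]
    have hE := congrArg Prod.fst hEO
    have hO := congrArg Prod.snd hEO
    simp only at hE hO
    simp only [PySem.List.slice_to _ h0, pySplit_eq, hE, hO, pyScan_eq]
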